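-- pv_equiv track=rewrite | github.com/Sidreyas/SOC_Agents | agents/powershell_agent/script_content_analyzer.py | _identify_behavioral_patterns
-- ===== SOURCE A (Python) =====
-- from typing import Dict, Any, List, Optional, Tuple
--
-- def _identify_behavioral_patterns(decoded_scripts: List[Dict[str, Any]]) -> Dict[str, Any]:
--     """Identify behavioral patterns in scripts"""
--     patterns = {
--         "execution_patterns": [],
--         "persistence_patterns": [],
--         "network_patterns": [],
--         "evasion_patterns": []
--     }
--
--     for script in decoded_scripts:
--         script_analysis = script.get("script_analysis", {})
--         indicators = script_analysis.get("suspicious_indicators", [])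
--
--         for indicator in indicators:
--             category = indicator.get("category")
--             if category in patterns:
--                 patterns[category].append(indicator)
--
--     return patterns
-- ===== SOURCE B (Python) =====
-- from typing import Dict, Any, List
--
-- def _identify_behavioral_patterns(decoded_scripts: List[Dict[str, Any]]) -> Dict[str, Any]:
--     """Identify behavioral patterns in scripts (flatten once, then one filter pass per category)."""
--     all_inds = [ind
--                 for script in decoded_scripts
--                 for ind in script.get("script_analysis", {}).get("suspicious_indicators", [])]
--     return {cat: [ind for ind in all_inds if ind.get("category") == cat]
--             for cat in ("execution_patterns", "persistence_patterns",
--                         "network_patterns", "evasion_patterns")}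
-- ===== Notes on version B (the rewrite author's own statement) =====
-- stated objective: alternative
-- what changed: Replaces the single dispatch loop that appends into a mutable four-bucket dict with a flatten of all indicators followed by four independent category-keyed filter passes.
import Mathlib
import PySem

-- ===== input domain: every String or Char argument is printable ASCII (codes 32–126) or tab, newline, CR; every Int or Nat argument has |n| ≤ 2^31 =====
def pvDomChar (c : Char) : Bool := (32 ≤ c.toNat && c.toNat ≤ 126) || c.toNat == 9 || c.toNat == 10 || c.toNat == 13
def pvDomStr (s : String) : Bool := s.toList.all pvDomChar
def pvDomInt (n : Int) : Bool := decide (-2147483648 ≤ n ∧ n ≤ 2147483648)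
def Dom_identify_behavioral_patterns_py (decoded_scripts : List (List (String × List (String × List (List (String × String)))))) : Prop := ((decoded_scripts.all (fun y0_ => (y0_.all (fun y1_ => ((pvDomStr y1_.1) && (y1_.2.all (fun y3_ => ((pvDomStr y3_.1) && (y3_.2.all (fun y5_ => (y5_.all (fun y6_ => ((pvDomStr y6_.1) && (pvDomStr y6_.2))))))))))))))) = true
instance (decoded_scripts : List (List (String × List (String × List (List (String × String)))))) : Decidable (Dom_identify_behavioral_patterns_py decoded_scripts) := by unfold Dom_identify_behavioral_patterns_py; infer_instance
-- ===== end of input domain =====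

-- B flattens all suspicious indicators once and builds each category bucket by an
-- independent filter pass, instead of A's single dispatch loop appending into a mutable dict.

-- ===== PORT A =====
-- one step of A's inner loop: dispatch one indicator into the bucket dict
def pvStepA (patterns : PySem.Dict String (List (List (String × String))))
    (indicator : List (String × String)) : PySem.Dict String (List (List (String × String))) :=
  match (PySem.Dict.mk indicator).get? "category" with
  | some c => if patterns.contains c then patterns.modify c [] (· ++ [indicator]) else patterns
  | none => patterns

def identify_behavioral_patterns_py (decoded_scripts : List (List (String × List (String × List (List (String × String)))))) : List (String × List (List (String × String))) :=
  let patterns : PySem.Dict String (List (List (String × String))) :=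
    PySem.Dict.mk [("execution_patterns", []), ("persistence_patterns", []),
                   ("network_patterns", []), ("evasion_patterns", [])]
  (decoded_scripts.foldl (fun patterns script =>
    let script_analysis := (PySem.Dict.mk script).getD "script_analysis" []
    let indicators := (PySem.Dict.mk script_analysis).getD "suspicious_indicators" []
    indicators.foldl pvStepA patterns) patterns).items

-- ===== PORT B =====
def identify_behavioral_patterns_py_alt (decoded_scripts : List (List (String × List (String × List (List (String × String)))))) : List (String × List (List (String × String))) :=
  let all_inds := decoded_scripts.flatMap (fun script =>
    (PySem.Dict.mk ((PySem.Dict.mk script).getD "script_analysis" [])).getD "suspicious_indicators" [])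
  ["execution_patterns", "persistence_patterns", "network_patterns", "evasion_patterns"].map
    (fun cat => (cat, all_inds.filter (fun ind => (PySem.Dict.mk ind).get? "category" == some cat)))

-- ===== PRECONDITION & SPEC =====
def Spec_identify_behavioral_patterns_py (decoded_scripts : List (List (String × List (String × List (List (String × String)))))) (out : List (String × List (List (String × String)))) : Prop := out = identify_behavioral_patterns_py_alt decoded_scripts
instance (decoded_scripts : List (List (String × List (String × List (List (String × String)))))) (out : List (String × List (List (String × String)))) : Decidable (Spec_identify_behavioral_patterns_py decoded_scripts out) := by unfold Spec_identify_behavioral_patterns_py; infer_instance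

-- ===== CLAIM (what is proved, stated in full; the proofs are below) =====
def Claim_equal_identify_behavioral_patterns_py : Prop := ∀ (decoded_scripts : List (List (String × List (String × List (List (String × String)))))), Dom_identify_behavioral_patterns_py decoded_scripts → Spec_identify_behavioral_patterns_py decoded_scripts (identify_behavioral_patterns_py decoded_scripts)

-- ===== LEMMAS AND PROOFS =====

-- abbreviation used only by the proofs below
def pvBuckets (b1 b2 b3 b4 : List (List (String × String))) : PySem.Dict String (List (List (String × String))) :=
  PySem.Dict.mk [("execution_patterns", b1), ("persistence_patterns", b2),
                 ("network_patterns", b3), ("evasion_patterns", b4)]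

theorem pvStepA_exec (b1 b2 b3 b4 : List (List (String × String))) (ind : List (String × String))
    (h : (PySem.Dict.mk ind).get? "category" = some "execution_patterns") :
    pvStepA (pvBuckets b1 b2 b3 b4) ind = pvBuckets (b1 ++ [ind]) b2 b3 b4 := by
  unfold pvStepA pvBuckets; rw [h]
  simp [PySem.Dict.contains, PySem.Dict.modify, PySem.Dict.insert, PySem.Dict.getD, PySem.Dict.get?]

theorem pvStepA_pers (b1 b2 b3 b4 : List (List (String × String))) (ind : List (String × String))
    (h : (PySem.Dict.mk ind).get? "category" = some "persistence_patterns") :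
    pvStepA (pvBuckets b1 b2 b3 b4) ind = pvBuckets b1 (b2 ++ [ind]) b3 b4 := by
  unfold pvStepA pvBuckets; rw [h]
  simp [PySem.Dict.contains, PySem.Dict.modify, PySem.Dict.insert, PySem.Dict.getD, PySem.Dict.get?]

theorem pvStepA_net (b1 b2 b3 b4 : List (List (String × String))) (ind : List (String × String))
    (h : (PySem.Dict.mk ind).get? "category" = some "network_patterns") :
    pvStepA (pvBuckets b1 b2 b3 b4) ind = pvBuckets b1 b2 (b3 ++ [ind]) b4 := by
  unfold pvStepA pvBuckets; rw [h]
  simp [PySem.Dict.contains, PySem.Dict.modify, PySem.Dict.insert, PySem.Dict.getD, PySem.Dict.get?]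

theorem pvStepA_eva (b1 b2 b3 b4 : List (List (String × String))) (ind : List (String × String))
    (h : (PySem.Dict.mk ind).get? "category" = some "evasion_patterns") :
    pvStepA (pvBuckets b1 b2 b3 b4) ind = pvBuckets b1 b2 b3 (b4 ++ [ind]) := by
  unfold pvStepA pvBuckets; rw [h]
  simp [PySem.Dict.contains, PySem.Dict.modify, PySem.Dict.insert, PySem.Dict.getD, PySem.Dict.get?]

theorem pvStepA_none (b1 b2 b3 b4 : List (List (String × String))) (ind : List (String × String))
    (h : (PySem.Dict.mk ind).get? "category" = none) :
    pvStepA (pvBuckets b1 b2 b3 b4) ind = pvBuckets b1 b2 b3 b4 := by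
  unfold pvStepA; rw [h]

theorem pvStepA_skip (b1 b2 b3 b4 : List (List (String × String))) (ind : List (String × String))
    (c : String) (h : (PySem.Dict.mk ind).get? "category" = some c)
    (h1 : c ≠ "execution_patterns") (h2 : c ≠ "persistence_patterns")
    (h3 : c ≠ "network_patterns") (h4 : c ≠ "evasion_patterns") :
    pvStepA (pvBuckets b1 b2 b3 b4) ind = pvBuckets b1 b2 b3 b4 := by
  unfold pvStepA pvBuckets; rw [h]
  simp [PySem.Dict.contains, Ne.symm h1, Ne.symm h2, Ne.symm h3, Ne.symm h4]

-- the inner-loop invariant: A's dispatch over a list of indicators appends to each bucket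
-- exactly the indicators whose category matches it
theorem pvFoldA_items (inds : List (List (String × String)))
    (b1 b2 b3 b4 : List (List (String × String))) :
    (inds.foldl pvStepA (pvBuckets b1 b2 b3 b4)).items
    = [("execution_patterns", b1 ++ inds.filter (fun i => (PySem.Dict.mk i).get? "category" == some "execution_patterns")),
       ("persistence_patterns", b2 ++ inds.filter (fun i => (PySem.Dict.mk i).get? "category" == some "persistence_patterns")),
       ("network_patterns", b3 ++ inds.filter (fun i => (PySem.Dict.mk i).get? "category" == some "network_patterns")),
       ("evasion_patterns", b4 ++ inds.filter (fun i => (PySem.Dict.mk i).get? "category" == some "evasion_patterns"))] := by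
  induction inds generalizing b1 b2 b3 b4 with
  | nil => simp [pvBuckets]
  | cons ind rest ih =>
    simp only [List.foldl_cons, List.filter_cons]
    rcases h : (PySem.Dict.mk ind).get? "category" with _ | c
    · rw [pvStepA_none _ _ _ _ _ h, ih]; simp
    · by_cases h1 : c = "execution_patterns"
      · subst h1; rw [pvStepA_exec _ _ _ _ _ h, ih]; simp
      · by_cases h2 : c = "persistence_patterns"
        · subst h2; rw [pvStepA_pers _ _ _ _ _ h, ih]; simp
        · by_cases h3 : c = "network_patterns"
          · subst h3; rw [pvStepA_net _ _ _ _ _ h, ih]; simp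
          · by_cases h4 : c = "evasion_patterns"
            · subst h4; rw [pvStepA_eva _ _ _ _ _ h, ih]; simp
            · rw [pvStepA_skip _ _ _ _ _ _ h h1 h2 h3 h4, ih]; simp [h1, h2, h3, h4]

theorem pvMain (ds : List (List (String × List (String × List (List (String × String)))))) :
    (ds.foldl (fun patterns script =>
        ((PySem.Dict.mk ((PySem.Dict.mk script).getD "script_analysis" [])).getD "suspicious_indicators" []).foldl
          pvStepA patterns)
      (pvBuckets [] [] [] [])).items
    = ["execution_patterns", "persistence_patterns", "network_patterns", "evasion_patterns"].map
        (fun cat => (cat, (ds.flatMap (fun script =>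
          (PySem.Dict.mk ((PySem.Dict.mk script).getD "script_analysis" [])).getD "suspicious_indicators" [])).filter
            (fun ind => (PySem.Dict.mk ind).get? "category" == some cat))) := by
  rw [← List.foldl_flatMap, pvFoldA_items]
  simp

-- ===== VERDICT (by name: the statement is the Claim_ definition above) =====
theorem identify_behavioral_patterns_py_spec : Claim_equal_identify_behavioral_patterns_py := by
  intro ds _
  exact pvMain ds
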